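-- pv_equiv track=rewrite | github.com/berayboztepe/UWR_DataScience | Algorithm Implementation Methods/Contest_13/Contest_13_c.py | tell_your_world
-- ===== SOURCE A (Python) =====
-- def tell_your_world(y_coordinates, n):
--     for i in range(1, n):
--         belongs_to_first_line = [False] * n
--
--         for j in range(n):
--             if i * (y_coordinates[j] - y_coordinates[0]) == j * (y_coordinates[i] - y_coordinates[0]):
--                 belongs_to_first_line[j] = True
--
--         first_other_point = -1
--         valid_partition = True
--
--         for j in range(n):
--             if not belongs_to_first_line[j]:
--                 if first_other_point == -1:
--                     first_other_point = j
--                 elif i * (y_coordinates[j] - y_coordinates[first_other_point]) != (j - first_other_point) * (y_coordinates[i] - y_coordinates[0]):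
--                     valid_partition = False
--                     break
--
--         if valid_partition and first_other_point != -1:
--             return True
--
--     return False
-- ===== SOURCE B (Python) =====
-- def tell_your_world(y_coordinates, n):
--     for i in range(1, n):
--         keys = {i * y_coordinates[j] - j * (y_coordinates[i] - y_coordinates[0])
--                 for j in range(n)}
--         if len(keys) == 2:
--             return True
--     return False
-- ===== Notes on version B (the rewrite author's own statement) =====
-- stated objective: simpler
-- what changed: For each candidate slope i, B builds the set of intercept keys i*y[j]-j*(y[i]-y[0]) in one pass and returns True when it has exactly 2 distinct values, replacing A's boolean-array pass plus first_other_point verification pass with early break.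
import Mathlib
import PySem

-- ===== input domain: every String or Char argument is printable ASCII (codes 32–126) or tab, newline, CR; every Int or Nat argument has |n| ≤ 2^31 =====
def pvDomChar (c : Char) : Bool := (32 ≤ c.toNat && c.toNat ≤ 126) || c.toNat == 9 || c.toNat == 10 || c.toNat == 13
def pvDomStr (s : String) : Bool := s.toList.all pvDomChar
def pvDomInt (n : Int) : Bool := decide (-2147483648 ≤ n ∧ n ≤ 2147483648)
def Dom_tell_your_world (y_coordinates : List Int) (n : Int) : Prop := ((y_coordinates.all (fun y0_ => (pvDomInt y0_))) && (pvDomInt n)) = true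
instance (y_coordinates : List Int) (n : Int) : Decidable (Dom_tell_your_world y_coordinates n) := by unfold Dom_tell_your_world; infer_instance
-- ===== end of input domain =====

-- B replaces A's boolean-array + first-other-point verification passes by one pass per slope
-- building a set of intercept keys and testing whether it has exactly 2 values (objective: simpler).

-- ===== PORT A =====
-- y_coordinates[j], total under Pre_ (all accessed indices satisfy 0 ≤ j < n ≤ len)
def pvGet (ys : List Int) (j : Int) : Int := PySem.List.pyGetD ys j 0

-- A's second loop over (j, belongs_to_first_line[j]); state = first_other_point;
-- returns (first_other_point, valid_partition)
def pvALoop2 (ys : List Int) (i : Int) : List (Int × Bool) → Int → Int × Bool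
  | [], fop => (fop, true)
  | (j, b) :: rest, fop =>
    if b then pvALoop2 ys i rest fop
    else if fop == -1 then pvALoop2 ys i rest j
    else if i * (pvGet ys j - pvGet ys fop) != (j - fop) * (pvGet ys i - pvGet ys 0) then (fop, false)
    else pvALoop2 ys i rest fop

-- A's outer loop over the candidate slope index i
def pvAOuter (ys : List Int) (n : Int) : List Int → Bool
  | [] => false
  | i :: rest =>
    let js := PySem.List.pyRange 0 n 1
    let belongs := js.map (fun j => i * (pvGet ys j - pvGet ys 0) == j * (pvGet ys i - pvGet ys 0))
    let r := pvALoop2 ys i (js.zip belongs) (-1)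
    if r.2 && r.1 != -1 then true else pvAOuter ys n rest

def tell_your_world (y_coordinates : List Int) (n : Int) : Bool :=
  pvAOuter y_coordinates n (PySem.List.pyRange 1 n 1)

-- ===== PORT B =====
def pvBOuter (ys : List Int) (n : Int) : List Int → Bool
  | [] => false
  | i :: rest =>
    let keys : PySem.Set Int := PySem.Set.ofList
      ((PySem.List.pyRange 0 n 1).map (fun j => i * pvGet ys j - j * (pvGet ys i - pvGet ys 0)))
    if keys.length == 2 then true else pvBOuter ys n rest

def tell_your_world_alt (y_coordinates : List Int) (n : Int) : Bool :=
  pvBOuter y_coordinates n (PySem.List.pyRange 1 n 1)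

-- ===== PRECONDITION & SPEC =====
-- Python A raises IndexError when n ≥ 2 and n > len(y_coordinates) (it reads y_coordinates[j]
-- for every j < n); for n ≤ 1 no index is read and A returns False regardless of the list
def Pre_tell_your_world (y_coordinates : List Int) (n : Int) : Prop :=
  n ≤ (y_coordinates.length : Int) ∨ n ≤ 1
instance (y_coordinates : List Int) (n : Int) : Decidable (Pre_tell_your_world y_coordinates n) := by
  unfold Pre_tell_your_world; infer_instance

def pvWitness_tell_your_world : List Int × Int := ([0, 1, 0, 1], 4)

def Spec_tell_your_world (y_coordinates : List Int) (n : Int) (out : Bool) : Prop := out = tell_your_world_alt y_coordinates n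
instance (y_coordinates : List Int) (n : Int) (out : Bool) : Decidable (Spec_tell_your_world y_coordinates n out) := by unfold Spec_tell_your_world; infer_instance

-- ===== CLAIM (what is proved, stated in full; the proofs are below) =====
def Claim_equal_tell_your_world : Prop := ∀ (y_coordinates : List Int) (n : Int), Dom_tell_your_world y_coordinates n → Pre_tell_your_world y_coordinates n → Spec_tell_your_world y_coordinates n (tell_your_world y_coordinates n)

-- ===== LEMMAS AND PROOFS =====

-- the intercept key of point j for candidate slope i (B's set element)
def pvKey (ys : List Int) (i j : Int) : Int := i * pvGet ys j - j * (pvGet ys i - pvGet ys 0)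

theorem pvZipMap (js : List Int) (b : Int → Bool) :
    js.zip (js.map b) = js.map (fun j => (j, b j)) := by
  induction js with
  | nil => rfl
  | cons j rest ih => simp [ih]

theorem pvBelongs_eq (ys : List Int) (i j : Int) :
    (i * (pvGet ys j - pvGet ys 0) == j * (pvGet ys i - pvGet ys 0))
      = (pvKey ys i j == pvKey ys i 0) := by
  by_cases h : i * (pvGet ys j - pvGet ys 0) = j * (pvGet ys i - pvGet ys 0)
  · have h2 : pvKey ys i j = pvKey ys i 0 := by unfold pvKey; linarith
    simp [h, h2]
  · have h2 : pvKey ys i j ≠ pvKey ys i 0 := by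
      unfold pvKey; intro hc; apply h; linarith
    simp [h, h2]

theorem pvSet_foldl_len_le {s l : List Int} :
    s.length ≤ (List.foldl PySem.Set.add s l).length := by
  induction l generalizing s with
  | nil => simp
  | cons x rest ih =>
    simp only [List.foldl_cons]
    refine le_trans ?_ (ih (s := PySem.Set.add s x))
    unfold PySem.Set.add
    split <;> simp

theorem pvSet_foldl_len_eq {s l : List Int} :
    ((List.foldl PySem.Set.add s l).length = s.length) ↔ ∀ x ∈ l, x ∈ s := by
  induction l generalizing s with
  | nil => simp
  | cons x rest ih =>
    simp only [List.foldl_cons, List.mem_cons]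
    by_cases hx : x ∈ s
    · have : PySem.Set.add s x = s := by simp [PySem.Set.add, PySem.Set.contains, hx]
      rw [this, ih]
      constructor
      · intro h y hy; rcases hy with rfl | hy; · exact hx
        exact h y hy
      · intro h y hy; exact h y (Or.inr hy)
    · have : PySem.Set.add s x = s ++ [x] := by simp [PySem.Set.add, PySem.Set.contains, hx]
      rw [this]
      constructor
      · intro h
        exfalso
        have := pvSet_foldl_len_le (s := s ++ [x]) (l := rest)
        simp [h] at this
      · rintro h
        exact absurd (h x (Or.inl rfl)) hx

-- phase 2 of A's second loop: once first_other_point is set to some j0 ≠ -1, the loop keeps it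
-- and checks every remaining off-line point against key j0
theorem pvALoop2_phase2 (ys : List Int) (i : Int) (js : List Int) (j0 : Int) (h0 : j0 ≠ -1) :
    pvALoop2 ys i (js.map (fun j => (j, pvKey ys i j == pvKey ys i 0))) j0
      = (j0, decide (∀ j ∈ js, pvKey ys i j = pvKey ys i 0 ∨ pvKey ys i j = pvKey ys i j0)) := by
  induction js with
  | nil => simp [pvALoop2]
  | cons j rest ih =>
    simp only [List.map_cons, pvALoop2]
    by_cases hb : pvKey ys i j = pvKey ys i 0
    · simp [hb, ih]
    · have hb' : (pvKey ys i j == pvKey ys i 0) = false := by simp [hb]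
      have hj0' : (j0 == (-1 : Int)) = false := by simp [h0]
      by_cases hf : pvKey ys i j = pvKey ys i j0
      · have hm : (i * (pvGet ys j - pvGet ys j0) != (j - j0) * (pvGet ys i - pvGet ys 0)) = false := by
          simp only [bne_eq_false_iff_eq]
          have := hf; unfold pvKey at this; linarith
        simp [hj0', hm, ih, hf]
      · have hm : (i * (pvGet ys j - pvGet ys j0) != (j - j0) * (pvGet ys i - pvGet ys 0)) = true := by
          simp only [bne_iff_ne, ne_eq]
          intro hc; apply hf; unfold pvKey; linarith
        have hd : ¬ (∀ j' ∈ j :: rest,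
            pvKey ys i j' = pvKey ys i 0 ∨ pvKey ys i j' = pvKey ys i j0) := by
          intro h
          rcases h j (List.mem_cons_self ..) with hc | hc
          · exact hb hc
          · exact hf hc
        simp [hb', hj0', hm]
        rintro (hc | hc)
        · exact absurd hc hb
        · exact absurd hc hf

-- phase 1 (first_other_point = -1): A's test equals "the key set has exactly 2 elements"
theorem pvPhase1 (ys : List Int) (i : Int) (js : List Int) (hjs : ∀ j ∈ js, 0 ≤ j) :
    ((pvALoop2 ys i (js.map (fun j => (j, pvKey ys i j == pvKey ys i 0))) (-1)).2
        && (pvALoop2 ys i (js.map (fun j => (j, pvKey ys i j == pvKey ys i 0))) (-1)).1 != -1)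
      = ((List.foldl PySem.Set.add [pvKey ys i 0] (js.map (pvKey ys i))).length == 2) := by
  induction js with
  | nil => simp [pvALoop2]
  | cons j rest ih =>
    have hj : (0:Int) ≤ j := hjs j (List.mem_cons_self ..)
    simp only [List.map_cons, pvALoop2, List.foldl_cons]
    by_cases hb : pvKey ys i j = pvKey ys i 0
    · rw [show PySem.Set.add [pvKey ys i 0] (pvKey ys i j) = [pvKey ys i 0] from by
        simp [PySem.Set.add, PySem.Set.contains, hb]]
      rw [show (pvKey ys i j == pvKey ys i 0) = true from by simp [hb]]
      simp only [if_true]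
      exact ih (fun j' hj' => hjs j' (List.mem_cons_of_mem _ hj'))
    · have hb' : (pvKey ys i j == pvKey ys i 0) = false := by simp [hb]
      have hj' : j ≠ -1 := by omega
      have hadd : PySem.Set.add [pvKey ys i 0] (pvKey ys i j)
          = [pvKey ys i 0, pvKey ys i j] := by
        simp [PySem.Set.add, PySem.Set.contains, hb]
      simp only [hb', Bool.false_eq_true, if_false, beq_self_eq_true, if_true, hadd,
        pvALoop2_phase2 ys i rest j hj']
      have hlen2 : ((List.foldl PySem.Set.add [pvKey ys i 0, pvKey ys i j]
            (rest.map (pvKey ys i))).length == 2)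
          = decide (∀ j' ∈ rest, pvKey ys i j' = pvKey ys i 0 ∨ pvKey ys i j' = pvKey ys i j) := by
        have h2 := pvSet_foldl_len_eq (s := [pvKey ys i 0, pvKey ys i j])
          (l := rest.map (pvKey ys i))
        by_cases hall : ∀ j' ∈ rest, pvKey ys i j' = pvKey ys i 0 ∨ pvKey ys i j' = pvKey ys i j
        · have hmem : ∀ x ∈ rest.map (pvKey ys i), x ∈ [pvKey ys i 0, pvKey ys i j] := by
            intro x hx
            rcases List.mem_map.1 hx with ⟨j', hj'', rfl⟩
            rcases hall j' hj'' with hc | hc <;> simp [hc]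
          have hlen : (List.foldl PySem.Set.add [pvKey ys i 0, pvKey ys i j]
              (rest.map (pvKey ys i))).length = 2 := by simpa using h2.2 hmem
          simp [hlen]
          exact hall
        · have hmem : ¬ ∀ x ∈ rest.map (pvKey ys i), x ∈ [pvKey ys i 0, pvKey ys i j] := by
            intro hc
            apply hall
            intro j' hj''
            have := hc (pvKey ys i j') (List.mem_map.2 ⟨j', hj'', rfl⟩)
            simpa using this
          have hlen : (List.foldl PySem.Set.add [pvKey ys i 0, pvKey ys i j]
              (rest.map (pvKey ys i))).length ≠ 2 := by
            intro hc
            exact hmem (h2.1 (by simpa using hc))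
          simp [hlen, hall]
      rw [hlen2]
      have : (j != (-1 : Int)) = true := by simp [hj']
      simp [this]

-- one outer-loop iteration: A's condition equals B's condition
theorem pvStep (ys : List Int) (n i : Int) (hn : 1 ≤ n) :
    (let js := PySem.List.pyRange 0 n 1
     let belongs := js.map (fun j => i * (pvGet ys j - pvGet ys 0) == j * (pvGet ys i - pvGet ys 0))
     let r := pvALoop2 ys i (js.zip belongs) (-1)
     (r.2 && r.1 != -1))
      = ((PySem.Set.ofList
          ((PySem.List.pyRange 0 n 1).map (fun j => i * pvGet ys j - j * (pvGet ys i - pvGet ys 0)))).length == 2) := by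
  have hsplit : PySem.List.pyRange 0 n 1 = 0 :: PySem.List.pyRange 1 n 1 :=
    PySem.List.pyRange_one_cons (by omega)
  have hmem : ∀ j ∈ PySem.List.pyRange 1 n 1, (0:Int) ≤ j := by
    intro j hj
    have := (PySem.List.mem_pyRange_one).1 hj
    omega
  have hbel : (fun j => i * (pvGet ys j - pvGet ys 0) == j * (pvGet ys i - pvGet ys 0))
      = (fun j => pvKey ys i j == pvKey ys i 0) := by
    funext j; exact pvBelongs_eq ys i j
  have hkey : (fun j => i * pvGet ys j - j * (pvGet ys i - pvGet ys 0)) = pvKey ys i := rfl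
  have h00 : (pvKey ys i 0 == pvKey ys i 0) = true := by simp
  have hadd0 : PySem.Set.add ([] : List Int) (pvKey ys i 0) = [pvKey ys i 0] := by
    simp [PySem.Set.add, PySem.Set.contains]
  simp only [pvZipMap, hbel, hkey]
  rw [hsplit]
  simp only [List.map_cons, PySem.Set.ofList_eq_foldl, List.foldl_cons, pvALoop2, h00,
    if_true, hadd0]
  exact pvPhase1 ys i _ hmem

theorem pvOuter_eq (ys : List Int) (n : Int) (hn : 1 ≤ n) (is : List Int) :
    pvAOuter ys n is = pvBOuter ys n is := by
  induction is with
  | nil => rfl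
  | cons i rest ih =>
    simp only [pvAOuter, pvBOuter]
    rw [pvStep ys n i hn, ih]

-- ===== VERDICT (by name: the statement is the Claim_ definition above) =====
theorem tell_your_world_spec : Claim_equal_tell_your_world := by
  intro ys n _ _
  unfold Spec_tell_your_world tell_your_world tell_your_world_alt
  by_cases hn : 1 ≤ n
  · exact pvOuter_eq ys n hn _
  · have : PySem.List.pyRange 1 n 1 = [] := by
      rw [PySem.List.pyRange_one]
      have : (n - 1).toNat = 0 := by omega
      simp [this]
    rw [this]; rfl
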